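-- pv_equiv track=rewrite | github.com/yjenis/Algorithm | 백준/Silver/2343. 기타 레슨/기타 레슨.py | find_min_blueray_size
-- ===== SOURCE A (Python) =====
-- def count_bluerays(lectures, size):
--     count = 1  # 블루레이 개수
--     total = 0  # 현재 블루레이에 담긴 강의 길이 합
--
--     for lecture in lectures:
--         if total + lecture > size:  # 현재 블루레이에 더 담을 수 없는 경우
--             count += 1  # 새로운 블루레이 사용
--             total = lecture  # 새 블루레이에 강의 추가
--         else:
--             total += lecture  # 현재 블루레이에 추가
--
--     return count  # 사용한 블루레이 개수 반환
--
-- def find_min_blueray_size(n, m, lectures):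
--     left, right = max(lectures), sum(lectures)
--     answer = right
--
--     while left <= right:
--         mid = (left + right) // 2  # 블루레이 크기의 후보
--         if count_bluerays(lectures, mid) <= m:  # 블루레이 개수가 m 이하인지 확인
--             answer = mid  # 가능한 크기이므로 저장
--             right = mid - 1  # 더 작은 크기로 탐색
--         else:
--             left = mid + 1  # 크기를 키워야 함
--
--     return answer  # 가능한 블루레이 크기 중 최소값 반환
-- ===== SOURCE B (Python) =====
-- def find_min_blueray_size(n, m, lectures):
--     size, total = max(lectures), sum(lectures)
--     while size < total:
--         discs, load, nxt = 1, 0, total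
--         for x in lectures:
--             if load + x > size:
--                 discs += 1
--                 if load + x < nxt:
--                     nxt = load + x
--                 load = x
--             else:
--                 load += x
--         if discs <= m:
--             return size
--         size = nxt
--     return size
-- ===== Notes on version B (the rewrite author's own statement) =====
-- stated objective: alternative
-- what changed: Replaces A's left/right/mid binary search over capacities with an event-driven search: each greedy pass also records the smallest overflow threshold (the least capacity at which the packing would change), and the candidate size jumps directly to that threshold until the disc count fits; no bisection at all.
-- outside the precondition, e.g. on find_min_blueray_size(0, 1, []): A raises ValueError, B raises ValueError; on find_min_blueray_size(7, 2, [7, 2, -8, 2, 8, 4, 0]): A returns 11, B returns 8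
import Mathlib
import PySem

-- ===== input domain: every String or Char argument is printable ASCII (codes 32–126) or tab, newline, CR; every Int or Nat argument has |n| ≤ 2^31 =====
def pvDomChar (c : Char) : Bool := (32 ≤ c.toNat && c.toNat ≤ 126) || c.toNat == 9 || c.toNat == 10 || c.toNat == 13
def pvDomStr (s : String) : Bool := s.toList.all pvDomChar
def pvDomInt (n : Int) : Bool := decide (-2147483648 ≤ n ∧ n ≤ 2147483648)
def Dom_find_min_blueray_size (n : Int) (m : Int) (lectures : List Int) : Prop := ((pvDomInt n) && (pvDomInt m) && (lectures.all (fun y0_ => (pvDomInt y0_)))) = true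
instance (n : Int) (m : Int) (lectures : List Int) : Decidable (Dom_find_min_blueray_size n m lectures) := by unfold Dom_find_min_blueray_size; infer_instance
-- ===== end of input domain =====

-- B replaces A's binary search with an event-driven search: each greedy pass also records the
-- smallest overflow threshold, and the candidate size jumps straight to it; no binary search.

-- ===== PORT A =====
def count_bluerays (lectures : List Int) (size : Int) : Int :=
  (lectures.foldl
    (fun (st : Int × Int) lecture =>
      if st.2 + lecture > size then (st.1 + 1, lecture) else (st.1, st.2 + lecture))
    (1, 0)).1

def fmbs_loop (lectures : List Int) (m : Int) (left right answer : Int) : Int :=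
  if h : left ≤ right then
    let mid := PySem.Int.floordiv (left + right) 2
    if count_bluerays lectures mid ≤ m then
      fmbs_loop lectures m left (mid - 1) mid
    else
      fmbs_loop lectures m (mid + 1) right answer
  else answer
termination_by (right + 1 - left).toNat
decreasing_by
  · have := PySem.Int.floordiv_two_mid_bounds h; omega
  · have := PySem.Int.floordiv_two_mid_bounds h; omega

def find_min_blueray_size (n : Int) (m : Int) (lectures : List Int) : Int :=
  match PySem.List.max? lectures (fun y => y) with
  | none => 0   -- Python raises ValueError on max([]); excluded by Pre_
  | some left =>
    let right := lectures.sum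
    fmbs_loop lectures m left right right

-- ===== PORT B =====
-- two facts the recursion in fmbs_jump needs for termination (cited in decreasing_by):
-- the tracked threshold `nxt` only decreases along the pass, and stays above `size`
theorem pv_jump_nxt_le (s : Int) : ∀ (l : List Int) (st : Int × Int × Int),
    (l.foldl (fun (st : Int × Int × Int) x =>
      if st.2.1 + x > s then (st.1 + 1, x, if st.2.1 + x < st.2.2 then st.2.1 + x else st.2.2)
      else (st.1, st.2.1 + x, st.2.2)) st).2.2 ≤ st.2.2 := by
  intro l
  induction l with
  | nil => intro st; exact le_rfl
  | cons x t ih =>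
    intro st
    simp only [List.foldl_cons]
    by_cases h : st.2.1 + x > s
    · rw [if_pos h]
      refine le_trans (ih _) ?_
      by_cases h2 : st.2.1 + x < st.2.2
      · simp only [if_pos h2]; omega
      · simp only [if_neg h2]; omega
    · rw [if_neg h]; exact ih _

theorem pv_jump_nxt_gt (s : Int) : ∀ (l : List Int) (st : Int × Int × Int), s < st.2.2 →
    s < (l.foldl (fun (st : Int × Int × Int) x =>
      if st.2.1 + x > s then (st.1 + 1, x, if st.2.1 + x < st.2.2 then st.2.1 + x else st.2.2)
      else (st.1, st.2.1 + x, st.2.2)) st).2.2 := by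
  intro l
  induction l with
  | nil => intro st h; exact h
  | cons x t ih =>
    intro st h
    simp only [List.foldl_cons]
    by_cases hb : st.2.1 + x > s
    · rw [if_pos hb]
      refine ih _ ?_
      by_cases h2 : st.2.1 + x < st.2.2
      · simp only [if_pos h2]; omega
      · simp only [if_neg h2]; exact h
    · rw [if_neg hb]; exact ih _ h

-- one greedy pass of Source B's inner for-loop: (discs, load, nxt) starting from (1, 0, total)
def bpass (lectures : List Int) (size total : Int) : Int × Int × Int :=
  lectures.foldl
    (fun (st : Int × Int × Int) x =>
      if st.2.1 + x > size then (st.1 + 1, x, if st.2.1 + x < st.2.2 then st.2.1 + x else st.2.2)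
      else (st.1, st.2.1 + x, st.2.2)) (1, 0, total)

theorem bpass_le (lectures : List Int) (size total : Int) : (bpass lectures size total).2.2 ≤ total :=
  pv_jump_nxt_le size lectures (1, 0, total)

theorem bpass_gt (lectures : List Int) (size total : Int) (h : size < total) :
    size < (bpass lectures size total).2.2 :=
  pv_jump_nxt_gt size lectures (1, 0, total) h

def fmbs_jump (lectures : List Int) (m : Int) (size total : Int) : Int :=
  if h : size < total then
    let r := bpass lectures size total
    if r.1 ≤ m then size else fmbs_jump lectures m r.2.2 total
  else size
termination_by (total - size).toNat
decreasing_by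
  have h1 := bpass_gt lectures size total h
  have h2 := bpass_le lectures size total
  omega

def find_min_blueray_size_alt (n : Int) (m : Int) (lectures : List Int) : Int :=
  match PySem.List.max? lectures (fun y => y) with
  | none => 0   -- Python raises ValueError on max([]); excluded by Pre_
  | some size =>
    let total := lectures.sum
    fmbs_jump lectures m size total

-- ===== PRECONDITION & SPEC =====
-- Pre_ excludes the empty list (both programs raise ValueError on max([])) and lists with a
-- negative lecture length: lengths are durations, and on a negative one the greedy disc count
-- is not monotone in the size, so A's binary search can return a non-minimal feasible size (an
-- artefact of which midpoints it probes) while B returns the first feasible size; such lists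
-- stay admitted when every size is trivially feasible (m exceeds the list length) and
-- max ≤ sum, where both programs return max, and when no size is feasible (m ≤ 0) and
-- max ≤ sum, where both programs return sum.
def Pre_find_min_blueray_size (n : Int) (m : Int) (lectures : List Int) : Prop :=
  lectures ≠ [] ∧ ((∀ x ∈ lectures, 0 ≤ x) ∨
    ((m ≤ 0 ∨ (lectures.length : Int) + 1 ≤ m) ∧ ∀ x ∈ lectures, x ≤ lectures.sum))
instance (n : Int) (m : Int) (lectures : List Int) : Decidable (Pre_find_min_blueray_size n m lectures) := by unfold Pre_find_min_blueray_size; infer_instance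

def pvWitness_find_min_blueray_size : Int × Int × List Int := (4, 2, [1, 3, 2, 4])

def Spec_find_min_blueray_size (n : Int) (m : Int) (lectures : List Int) (out : Int) : Prop := out = find_min_blueray_size_alt n m lectures
instance (n : Int) (m : Int) (lectures : List Int) (out : Int) : Decidable (Spec_find_min_blueray_size n m lectures out) := by unfold Spec_find_min_blueray_size; infer_instance

-- ===== CLAIM (what is proved, stated in full; the proofs are below) =====
def Claim_equal_find_min_blueray_size : Prop := ∀ (n : Int) (m : Int) (lectures : List Int), Dom_find_min_blueray_size n m lectures → Pre_find_min_blueray_size n m lectures → Spec_find_min_blueray_size n m lectures (find_min_blueray_size n m lectures)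

-- ===== LEMMAS AND PROOFS =====

-- running A's greedy counter with a larger size never uses more discs (nonnegative lengths)
theorem pv_mono_run (s s2 : Int) (hs : s ≤ s2) :
    ∀ (l : List Int), (∀ x ∈ l, 0 ≤ x) → ∀ (c a c2 a2 : Int), 0 ≤ a → 0 ≤ a2 →
    (c2 < c ∨ (c2 = c ∧ a2 ≤ a)) →
    ((l.foldl (fun (st : Int × Int) lecture =>
        if st.2 + lecture > s2 then (st.1 + 1, lecture) else (st.1, st.2 + lecture)) (c2, a2)).1 <
     (l.foldl (fun (st : Int × Int) lecture =>
        if st.2 + lecture > s then (st.1 + 1, lecture) else (st.1, st.2 + lecture)) (c, a)).1) ∨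
    ((l.foldl (fun (st : Int × Int) lecture =>
        if st.2 + lecture > s2 then (st.1 + 1, lecture) else (st.1, st.2 + lecture)) (c2, a2)).1 =
     (l.foldl (fun (st : Int × Int) lecture =>
        if st.2 + lecture > s then (st.1 + 1, lecture) else (st.1, st.2 + lecture)) (c, a)).1 ∧
     (l.foldl (fun (st : Int × Int) lecture =>
        if st.2 + lecture > s2 then (st.1 + 1, lecture) else (st.1, st.2 + lecture)) (c2, a2)).2 ≤
     (l.foldl (fun (st : Int × Int) lecture =>
        if st.2 + lecture > s then (st.1 + 1, lecture) else (st.1, st.2 + lecture)) (c, a)).2) := by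
  intro l
  induction l with
  | nil =>
    intro _ c a c2 a2 _ _ hI
    simp only [List.foldl_nil]
    exact hI
  | cons x t ih =>
    intro hnn c a c2 a2 ha ha2 hI
    have hx : 0 ≤ x := hnn x (by simp)
    have hnn' : ∀ y ∈ t, 0 ≤ y := fun y hy => hnn y (by simp [hy])
    simp only [List.foldl_cons]
    by_cases h1 : a + x > s
    · by_cases h2 : a2 + x > s2
      · rw [if_pos h1, if_pos h2]
        exact ih hnn' (c + 1) x (c2 + 1) x hx hx (by omega)
      · rw [if_pos h1, if_neg h2]
        exact ih hnn' (c + 1) x c2 (a2 + x) hx (by omega) (by omega)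
    · by_cases h2 : a2 + x > s2
      · rw [if_neg h1, if_pos h2]
        exact ih hnn' c (a + x) (c2 + 1) x (by omega) hx (by omega)
      · rw [if_neg h1, if_neg h2]
        exact ih hnn' c (a + x) c2 (a2 + x) (by omega) (by omega) (by omega)

theorem count_mono (l : List Int) (hnn : ∀ x ∈ l, 0 ≤ x) {s s2 : Int} (hs : s ≤ s2) :
    count_bluerays l s2 ≤ count_bluerays l s := by
  have := pv_mono_run s s2 hs l hnn 1 0 1 0 le_rfl le_rfl (Or.inr ⟨rfl, le_rfl⟩)
  unfold count_bluerays
  rcases this with h | ⟨h, _⟩ <;> omega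

theorem feasible_mono (l : List Int) (hnn : ∀ x ∈ l, 0 ≤ x) (m : Int) {s s2 : Int}
    (hs : s ≤ s2) (h : count_bluerays l s ≤ m) : count_bluerays l s2 ≤ m :=
  le_trans (count_mono l hnn hs) h

-- trace identity: for any s' between the probed size and the final threshold, A's counting
-- pass at s' walks the exact same trace as B's pass at s (same discs, same load)
theorem pv_jump_trace (s s' : Int) (hs : s ≤ s') :
    ∀ (l : List Int) (c load nxt0 : Int),
    s' < (l.foldl (fun (st : Int × Int × Int) x =>
        if st.2.1 + x > s then (st.1 + 1, x, if st.2.1 + x < st.2.2 then st.2.1 + x else st.2.2)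
        else (st.1, st.2.1 + x, st.2.2)) (c, load, nxt0)).2.2 →
    l.foldl (fun (st : Int × Int) lecture =>
        if st.2 + lecture > s' then (st.1 + 1, lecture) else (st.1, st.2 + lecture)) (c, load) =
    ((l.foldl (fun (st : Int × Int × Int) x =>
        if st.2.1 + x > s then (st.1 + 1, x, if st.2.1 + x < st.2.2 then st.2.1 + x else st.2.2)
        else (st.1, st.2.1 + x, st.2.2)) (c, load, nxt0)).1,
     (l.foldl (fun (st : Int × Int × Int) x =>
        if st.2.1 + x > s then (st.1 + 1, x, if st.2.1 + x < st.2.2 then st.2.1 + x else st.2.2)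
        else (st.1, st.2.1 + x, st.2.2)) (c, load, nxt0)).2.1) := by
  intro l
  induction l with
  | nil => intro c load nxt0 _; rfl
  | cons x t ih =>
    intro c load nxt0 hlt
    simp only [List.foldl_cons] at hlt ⊢
    by_cases hb : load + x > s
    · simp only [if_pos hb] at hlt ⊢
      -- the final threshold is ≤ the running min, which is ≤ load + x here
      have hle := pv_jump_nxt_le s t (c + 1, x, if load + x < nxt0 then load + x else nxt0)
      simp only at hle
      have hb' : load + x > s' := by
        by_cases h2 : load + x < nxt0
        · simp only [if_pos h2] at hlt hle; omega
        · simp only [if_neg h2] at hlt hle; omega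
      rw [if_pos hb']
      exact ih (c + 1) x _ hlt
    · simp only [if_neg hb] at hlt ⊢
      have hb' : ¬ load + x > s' := by omega
      rw [if_neg hb']
      exact ih c (load + x) nxt0 hlt

-- corollary at the count_bluerays level: if s ≤ s' < final threshold of B's pass at s,
-- then count_bluerays l s' equals the discs B's pass at s counted
theorem pv_jump_count (l : List Int) (s s' total : Int) (hs : s ≤ s')
    (hlt : s' < (bpass l s total).2.2) :
    count_bluerays l s' = (bpass l s total).1 := by
  unfold count_bluerays bpass
  unfold bpass at hlt
  rw [pv_jump_trace s s' hs l 1 0 total hlt]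

-- what the jump loop returns: the first feasible size in [size, total], else total
theorem jump_spec (l : List Int) (m total : Int) :
    ∀ (N : Nat) (size : Int), (total - size).toNat ≤ N → size ≤ total →
    size ≤ fmbs_jump l m size total ∧ fmbs_jump l m size total ≤ total ∧
    (count_bluerays l (fmbs_jump l m size total) ≤ m ∨ fmbs_jump l m size total = total) ∧
    (∀ e : Int, size ≤ e → e < fmbs_jump l m size total → ¬ count_bluerays l e ≤ m) := by
  intro N
  induction N with
  | zero =>
    intro size hN hle
    rw [fmbs_jump.eq_def, dif_neg (by omega)]
    refine ⟨le_rfl, hle, Or.inr (by omega), ?_⟩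
    intro e h1 h2; omega
  | succ N ih =>
    intro size hN hle
    rw [fmbs_jump.eq_def]
    by_cases h : size < total
    · rw [dif_pos h]
      have hgt := bpass_gt l size total h
      have hnle := bpass_le l size total
      set r := bpass l size total with hr
      have hcnt : count_bluerays l size = r.1 :=
        pv_jump_count l size size total le_rfl (by omega)
      by_cases hf : r.1 ≤ m
      · rw [if_pos hf]
        refine ⟨le_rfl, hle, Or.inl (by omega), ?_⟩
        intro e h1 h2; omega
      · rw [if_neg hf]
        obtain ⟨i1, i2, i3, i4⟩ := ih r.2.2 (by omega) (by omega)
        refine ⟨by omega, i2, i3, ?_⟩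
        intro e he1 he2
        by_cases hes : e < r.2.2
        · -- size ≤ e < threshold: the trace at e is B's trace at size, so count e = r.1 > m
          have hce := pv_jump_count l size e total he1 (by omega)
          rw [← hr] at hce
          omega
        · exact i4 e (by omega) he2
    · rw [dif_neg h]
      refine ⟨le_rfl, hle, Or.inr (by omega), ?_⟩
      intro e h1 h2; omega

-- the greedy counter uses at most 1 + len discs, whatever the size
theorem count_le_len (s : Int) : ∀ (l : List Int) (c a : Int),
    (l.foldl (fun (st : Int × Int) lecture =>
      if st.2 + lecture > s then (st.1 + 1, lecture) else (st.1, st.2 + lecture)) (c, a)).1 ≤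
      c + l.length := by
  intro l
  induction l with
  | nil => intro c a; simp
  | cons x t ih =>
    intro c a
    simp only [List.foldl_cons, List.length_cons]
    by_cases h : a + x > s
    · rw [if_pos h]
      have := ih (c + 1) x
      push_cast at this ⊢
      omega
    · rw [if_neg h]
      have := ih c (a + x)
      push_cast at this ⊢
      omega

-- the greedy counter uses at least one disc
theorem count_ge_one (s : Int) : ∀ (l : List Int) (c a : Int),
    c ≤ (l.foldl (fun (st : Int × Int) lecture =>
      if st.2 + lecture > s then (st.1 + 1, lecture) else (st.1, st.2 + lecture)) (c, a)).1 := by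
  intro l
  induction l with
  | nil => intro c a; simp
  | cons x t ih =>
    intro c a
    simp only [List.foldl_cons]
    by_cases h : a + x > s
    · rw [if_pos h]
      have := ih (c + 1) x
      omega
    · rw [if_neg h]
      exact ih c (a + x)

-- A's binary search when every size is feasible: it descends to the left endpoint
theorem loop_always (l : List Int) (m : Int) (hF : ∀ s : Int, count_bluerays l s ≤ m) :
    ∀ (N : Nat) (left right answer : Int), (right + 1 - left).toNat ≤ N →
    left ≤ right + 1 → (left = right + 1 → answer = left) →
    fmbs_loop l m left right answer = left := by
  intro N
  induction N with
  | zero =>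
    intro left right answer hN h1 h2
    rw [fmbs_loop, dif_neg (by omega)]
    exact h2 (by omega)
  | succ N ih =>
    intro left right answer hN h1 h2
    rw [fmbs_loop]
    by_cases hlr : left ≤ right
    · rw [dif_pos hlr]
      have hmid := PySem.Int.floordiv_two_mid_bounds hlr
      set mid := PySem.Int.floordiv (left + right) 2 with hm
      rw [if_pos (hF mid)]
      exact ih left (mid - 1) mid (by omega) (by omega) (by omega)
    · rw [dif_neg hlr]
      exact h2 (by omega)

-- B's jump loop when the very first size is feasible: it returns it at once
theorem jump_first (l : List Int) (m size total : Int) (hle : size ≤ total)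
    (hc : count_bluerays l size ≤ m) : fmbs_jump l m size total = size := by
  rw [fmbs_jump.eq_def]
  by_cases h : size < total
  · rw [dif_pos h]
    have hgt := bpass_gt l size total h
    have hcnt : count_bluerays l size = (bpass l size total).1 :=
      pv_jump_count l size size total le_rfl hgt
    simp only
    rw [if_pos (by omega)]
  · rw [dif_neg h]

-- A's binary search, case "some feasible size exists": it returns the least feasible r
theorem loop_eq_of_feasible (l : List Int) (hnn : ∀ x ∈ l, 0 ≤ x) (m lo r : Int)
    (hPr : count_bluerays l r ≤ m)
    (hbelow : ∀ s : Int, lo ≤ s → s < r → ¬ count_bluerays l s ≤ m) :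
    ∀ (N : Nat) (left right answer : Int), (right + 1 - left).toNat ≤ N →
    lo ≤ left → left ≤ r → r ≤ right + 1 → (r = right + 1 → answer = r) →
    fmbs_loop l m left right answer = r := by
  intro N
  induction N with
  | zero =>
    intro left right answer hN h1 h2 h3 h4
    rw [fmbs_loop, dif_neg (by omega)]
    exact h4 (by omega)
  | succ N ih =>
    intro left right answer hN h1 h2 h3 h4
    rw [fmbs_loop]
    by_cases hlr : left ≤ right
    · rw [dif_pos hlr]
      have hmid := PySem.Int.floordiv_two_mid_bounds hlr
      set mid := PySem.Int.floordiv (left + right) 2 with hm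
      by_cases hP : count_bluerays l mid ≤ m
      · rw [if_pos hP]
        have hrm : r ≤ mid := by
          by_contra hc
          exact hbelow mid (by omega) (by omega) hP
        exact ih left (mid - 1) mid (by omega) h1 h2 (by omega) (by omega)
      · rw [if_neg hP]
        have hmr : mid < r := by
          by_contra hc
          exact hP (feasible_mono l hnn m (by omega) hPr)
        exact ih (mid + 1) right answer (by omega) (by omega) (by omega) h3 h4
    · rw [dif_neg hlr]
      exact h4 (by omega)

-- A's binary search, case "no feasible size at all": the initial answer is returned
theorem loop_eq_of_infeasible (l : List Int) (m lo total : Int)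
    (hnone : ∀ s : Int, lo ≤ s → s ≤ total → ¬ count_bluerays l s ≤ m) :
    ∀ (N : Nat) (left right : Int), (right + 1 - left).toNat ≤ N →
    lo ≤ left → right ≤ total →
    fmbs_loop l m left right total = total := by
  intro N
  induction N with
  | zero =>
    intro left right hN h1 h2
    rw [fmbs_loop, dif_neg (by omega)]
  | succ N ih =>
    intro left right hN h1 h2
    rw [fmbs_loop]
    by_cases hlr : left ≤ right
    · rw [dif_pos hlr]
      have hmid := PySem.Int.floordiv_two_mid_bounds hlr
      set mid := PySem.Int.floordiv (left + right) 2 with hm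
      rw [if_neg (hnone mid (by omega) (by omega))]
      exact ih (mid + 1) right (by omega) (by omega) h2
    · rw [dif_neg hlr]

theorem mem_le_sum (l : List Int) (hnn : ∀ x ∈ l, 0 ≤ x) : ∀ x ∈ l, x ≤ l.sum := by
  induction l with
  | nil => intro x hx; simp at hx
  | cons y t ih =>
    intro x hx
    have hnn' : ∀ z ∈ t, 0 ≤ z := fun z hz => hnn z (by simp [hz])
    have hts : 0 ≤ t.sum := List.sum_nonneg (fun z hz => hnn' z hz)
    rcases List.mem_cons.mp hx with h | h
    · subst h; simp; omega
    · have := ih hnn' x h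
      have hy : 0 ≤ y := hnn y (by simp)
      simp; omega

-- ===== VERDICT (by name: the statement is the Claim_ definition above) =====
theorem find_min_blueray_size_spec : Claim_equal_find_min_blueray_size := by
  intro n m lectures _ hPre
  obtain ⟨hne, hcase⟩ := hPre
  unfold Spec_find_min_blueray_size find_min_blueray_size find_min_blueray_size_alt
  cases hmax : PySem.List.max? lectures (fun y => y) with
  | none => rfl
  | some lo =>
    have hlomem : lo ∈ lectures := PySem.List.max?_mem hmax
    rcases hcase with hnn | ⟨hm01, hbnd⟩
    case inr =>
      have hlo_le : lo ≤ lectures.sum := hbnd lo hlomem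
      show fmbs_loop lectures m lo lectures.sum lectures.sum = fmbs_jump lectures m lo lectures.sum
      rcases hm01 with hm0 | hm
      · -- no size is feasible (count ≥ 1 > m): A keeps its initial answer sum, B jumps to sum
        have hN : ∀ s : Int, ¬ count_bluerays lectures s ≤ m := by
          intro s
          have := count_ge_one s lectures 1 0
          unfold count_bluerays
          omega
        obtain ⟨j1, j2, j3, j4⟩ :=
          jump_spec lectures m lectures.sum (lectures.sum - lo).toNat lo le_rfl hlo_le
        rw [loop_eq_of_infeasible lectures m lo lectures.sum (fun s _ _ => hN s)
          (lectures.sum + 1 - lo).toNat lo lectures.sum (by omega) le_rfl le_rfl]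
        rcases j3 with hP | hEq
        · exact absurd hP (hN _)
        · omega
      · -- every size is feasible (count ≤ 1 + len ≤ m): A descends to max, B returns it at once
        have hF : ∀ s : Int, count_bluerays lectures s ≤ m := by
          intro s
          have := count_le_len s lectures 1 0
          unfold count_bluerays
          omega
        rw [loop_always lectures m hF (lectures.sum + 1 - lo).toNat lo lectures.sum lectures.sum
          (by omega) (by omega) (by omega)]
        rw [jump_first lectures m lo lectures.sum hlo_le (hF lo)]
    have hlo_le : lo ≤ lectures.sum := mem_le_sum lectures hnn lo hlomem
    set total := lectures.sum with htot
    obtain ⟨j1, j2, j3, j4⟩ :=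
      jump_spec lectures m total (total - lo).toNat lo le_rfl hlo_le
    set r := fmbs_jump lectures m lo total with hrdef
    show fmbs_loop lectures m lo total total = r
    rcases j3 with hP | hEq
    · exact loop_eq_of_feasible lectures hnn m lo r hP (fun s hs1 hs2 => j4 s hs1 hs2)
        (total + 1 - lo).toNat lo total total (by omega) le_rfl j1 (by omega) (by omega)
    · rw [hEq]
      by_cases hPt : count_bluerays lectures total ≤ m
      · exact loop_eq_of_feasible lectures hnn m lo total hPt
          (fun s hs1 hs2 => j4 s hs1 (by omega))
          (total + 1 - lo).toNat lo total total (by omega) le_rfl (by omega) (by omega) (by omega)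
      · refine loop_eq_of_infeasible lectures m lo total ?_
          (total + 1 - lo).toNat lo total (by omega) le_rfl le_rfl
        intro s hs1 hs2
        by_cases hst : s = total
        · simpa [hst] using hPt
        · exact j4 s hs1 (by omega)
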